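-- pv_equiv track=rewrite | github.com/tvtdev94/dbread | src/dbread/mongo/schema.py | docs_to_rows
-- ===== SOURCE A (Python) =====
-- def docs_to_rows(docs: list[dict], cap: int) -> tuple[list[list], list[str]]:
--     """Flatten a list of top-level dicts to (rows, columns) using the union of keys.
--
--     Missing keys become `None`. Non-dict items contribute an all-`None` row. Respects `cap`.
--     """
--     cols: list[str] = []
--     trimmed = docs[:cap]
--     for d in trimmed:
--         if isinstance(d, dict):
--             for k in d:
--                 if k not in cols:
--                     cols.append(k)
--     rows = [
--         [d.get(k) if isinstance(d, dict) else None for k in cols]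
--         for d in trimmed
--     ]
--     return rows, cols
-- ===== SOURCE B (Python) =====
-- def docs_to_rows(docs: list[dict], cap: int) -> tuple[list[list], list[str]]:
--     """Flatten dicts to (rows, columns): index-table pass, then scatter each doc into a preallocated row."""
--     trimmed = docs[:cap]
--     idx: dict[str, int] = {}
--     for d in trimmed:
--         if isinstance(d, dict):
--             for k in d:
--                 if k not in idx:
--                     idx[k] = len(idx)
--     n = len(idx)
--     rows = []
--     for d in trimmed:
--         row = [None] * n
--         if isinstance(d, dict):
--             for k, v in d.items():
--                 row[idx[k]] = v
--         rows.append(row)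
--     return rows, list(idx)
-- ===== Notes on version B (the rewrite author's own statement) =====
-- stated objective: faster
-- what changed: B builds a key-to-position index dict in one pass and then scatters each doc's own items into a preallocated all-None row by index, instead of A's list-membership column collection and per-row gather that loops over every column calling d.get(k).
import Mathlib
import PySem

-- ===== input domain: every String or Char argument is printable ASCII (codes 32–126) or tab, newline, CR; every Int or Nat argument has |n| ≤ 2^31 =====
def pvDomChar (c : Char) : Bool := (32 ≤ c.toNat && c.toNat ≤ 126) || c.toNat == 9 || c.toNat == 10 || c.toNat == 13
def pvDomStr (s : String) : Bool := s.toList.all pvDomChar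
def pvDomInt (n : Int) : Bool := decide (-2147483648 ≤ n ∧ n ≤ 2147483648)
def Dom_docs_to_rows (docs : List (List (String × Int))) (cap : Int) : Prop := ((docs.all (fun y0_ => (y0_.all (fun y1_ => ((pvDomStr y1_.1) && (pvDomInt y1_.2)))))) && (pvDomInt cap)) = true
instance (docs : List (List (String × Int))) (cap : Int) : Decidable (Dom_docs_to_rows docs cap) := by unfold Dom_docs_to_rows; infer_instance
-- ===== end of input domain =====

-- B replaces A's per-row gather over all columns (d.get(k) for every column k) by a key→position
-- index built once and a scatter of each doc's own items into a preallocated None row; same values.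
-- Under the stated type every doc IS a dict (list[dict[str, int]]), so A's 'isinstance(d, dict)'
-- guard is always true and has no Lean counterpart; each doc list is read through PySem.Dict.ofList,
-- the dict value it denotes.

-- ===== PORT A =====
-- cols = []; for d in trimmed: for k in d: if k not in cols: cols.append(k)
def pvColsAdd (cols : List String) (d : List (String × Int)) : List String :=
  (PySem.Dict.ofList d).keys.foldl (fun cols k => if k ∈ cols then cols else cols ++ [k]) cols

def docs_to_rows (docs : List (List (String × Int))) (cap : Int) : List (List (Option Int)) × List String :=
  let trimmed := PySem.List.slice docs none (some cap)   -- docs[:cap]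
  let cols := trimmed.foldl pvColsAdd []
  let rows := trimmed.map (fun d => cols.map (fun k => (PySem.Dict.ofList d).get? k))  -- d.get(k)
  (rows, cols)

-- ===== PORT B =====
-- for d in trimmed: for k in d: if k not in idx: idx[k] = len(idx)
def pvIdxAdd (idx : PySem.Dict String Nat) (d : List (String × Int)) : PySem.Dict String Nat :=
  (PySem.Dict.ofList d).keys.foldl (fun idx k => if idx.contains k then idx else idx.insert k idx.size) idx

-- row = [None] * n; for k, v in d.items(): row[idx[k]] = v   (idx[k] is never a KeyError: every key was indexed)
def pvFillRow (idx : PySem.Dict String Nat) (n : Nat) (d : List (String × Int)) : List (Option Int) :=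
  (PySem.Dict.ofList d).items.foldl
    (fun row kv => match idx.get? kv.1 with
      | some i => row.set i (some kv.2)
      | none => row)
    (List.replicate n none)

def docs_to_rows_alt (docs : List (List (String × Int))) (cap : Int) : List (List (Option Int)) × List String :=
  let trimmed := PySem.List.slice docs none (some cap)   -- docs[:cap]
  let idx := trimmed.foldl pvIdxAdd PySem.Dict.empty
  let rows := trimmed.map (pvFillRow idx idx.size)
  (rows, idx.keys)   -- list(idx)

-- ===== PRECONDITION & SPEC =====
def Spec_docs_to_rows (docs : List (List (String × Int))) (cap : Int) (out : List (List (Option Int)) × List String) : Prop := out = docs_to_rows_alt docs cap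
instance (docs : List (List (String × Int))) (cap : Int) (out : List (List (Option Int)) × List String) : Decidable (Spec_docs_to_rows docs cap out) := by unfold Spec_docs_to_rows; infer_instance

-- ===== CLAIM (what is proved, stated in full; the proofs are below) =====
def Claim_equal_docs_to_rows : Prop := ∀ (docs : List (List (String × Int))) (cap : Int), Dom_docs_to_rows docs cap → Spec_docs_to_rows docs cap (docs_to_rows docs cap)

-- ===== LEMMAS AND PROOFS =====

-- The invariant tying B's index dict to A's column list: same keys in the same order, and the
-- index stored for a key is its position in A's cols.
def pvInv (idx : PySem.Dict String Nat) (cols : List String) : Prop :=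
  idx.keys = cols ∧ ∀ k, idx.get? k = if k ∈ cols then some (cols.idxOf k) else none

theorem pvDict_size_eq_keys_length (d : PySem.Dict String Nat) : d.size = d.keys.length := by
  simp [PySem.Dict.size, PySem.Dict.keys]

theorem pvInv_step (idx : PySem.Dict String Nat) (cols : List String) (k : String)
    (h : pvInv idx cols) :
    pvInv (if idx.contains k then idx else idx.insert k idx.size)
          (if k ∈ cols then cols else cols ++ [k]) := by
  obtain ⟨hkeys, hget⟩ := h
  have hc : idx.contains k = decide (k ∈ cols) := by
    rw [PySem.Dict.contains_eq_decide_mem_keys, hkeys]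
  by_cases hk : k ∈ cols
  · simp [hc, hk]; exact ⟨hkeys, hget⟩
  · have hcf : idx.contains k = false := by simp [hc, hk]
    simp only [hc, hk, decide_false, Bool.false_eq_true, if_false]
    constructor
    · rw [PySem.Dict.keys_insert_of_not_contains _ _ hcf, hkeys]
    · intro k'
      rw [PySem.Dict.get?_insert]
      by_cases hk' : k' = k
      · subst hk'
        have : (cols ++ [k']).idxOf k' = cols.length := by
          simp [List.idxOf_append, hk]
        simp [this, pvDict_size_eq_keys_length, hkeys]
      · rw [if_neg hk', hget k']
        by_cases hm : k' ∈ cols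
        · rw [if_pos hm, if_pos (by simp [hm]), List.idxOf_append_of_mem hm]
        · rw [if_neg hm, if_neg (by simp [hm, hk'])]

theorem pvInv_foldKeys (ks : List String) : ∀ (idx : PySem.Dict String Nat) (cols : List String),
    pvInv idx cols →
    pvInv (ks.foldl (fun idx k => if idx.contains k then idx else idx.insert k idx.size) idx)
          (ks.foldl (fun cols k => if k ∈ cols then cols else cols ++ [k]) cols) := by
  induction ks with
  | nil => intro idx cols h; exact h
  | cons k ks ih => intro idx cols h; exact ih _ _ (pvInv_step idx cols k h)

theorem pvInv_fold (t : List (List (String × Int))) :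
    ∀ (idx : PySem.Dict String Nat) (cols : List String), pvInv idx cols →
    pvInv (t.foldl pvIdxAdd idx) (t.foldl pvColsAdd cols) := by
  induction t with
  | nil => intro idx cols h; exact h
  | cons d t ih =>
      intro idx cols h
      exact ih _ _ (pvInv_foldKeys (PySem.Dict.ofList d).keys idx cols h)

theorem pvInv_empty : pvInv PySem.Dict.empty [] := by
  constructor
  · simp [PySem.Dict.keys_empty]
  · intro k; simp [PySem.Dict.get?_empty]

theorem pvColsAdd_eq_update (cols : List String) (d : List (String × Int)) :
    pvColsAdd cols d = PySem.Set.update cols (PySem.Dict.ofList d).keys := by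
  unfold pvColsAdd PySem.Set.update
  congr 1
  funext s k
  exact (PySem.Set.add_eq_ite s k).symm

theorem pvCols_nodup (t : List (List (String × Int))) :
    ∀ (cols : List String), cols.Nodup → (t.foldl pvColsAdd cols).Nodup := by
  induction t with
  | nil => intro cols h; exact h
  | cons d t ih =>
      intro cols h
      simp only [List.foldl_cons]
      exact ih _ (by rw [pvColsAdd_eq_update]; exact PySem.Set.nodup_update _ _ h)

theorem pvCols_mono (t : List (List (String × Int))) :
    ∀ (cols : List String) (k : String), k ∈ cols → k ∈ t.foldl pvColsAdd cols := by
  induction t with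
  | nil => intro cols k h; exact h
  | cons d t ih =>
      intro cols k h
      simp only [List.foldl_cons]
      exact ih _ _ (by rw [pvColsAdd_eq_update]; exact (PySem.Set.mem_update _ _ _).mpr (Or.inl h))

theorem pvCols_mem_of_key (t : List (List (String × Int))) :
    ∀ (cols : List String) (d : List (String × Int)), d ∈ t →
    ∀ k ∈ (PySem.Dict.ofList d).keys, k ∈ t.foldl pvColsAdd cols := by
  induction t with
  | nil => intro _ _ h; exact absurd h (List.not_mem_nil)
  | cons d' t ih =>
      intro cols d hd k hk
      rcases List.mem_cons.mp hd with h | h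
      · subst h
        simp only [List.foldl_cons]
        exact pvCols_mono t _ k (by rw [pvColsAdd_eq_update]; exact (PySem.Set.mem_update _ _ _).mpr (Or.inr hk))
      · exact ih _ d h k hk

-- Scattering a nodup-keyed pair list into a row equals, at each index j, the first pair whose key
-- is cols[j] (or the old cell when no pair has that key).
theorem pvScatter_length (cols : List String) :
    ∀ (ps : List (String × Int)) (row : List (Option Int)),
    (ps.foldl (fun row q => row.set (cols.idxOf q.1) (some q.2)) row).length = row.length := by
  intro ps
  induction ps with
  | nil => intro row; rfl
  | cons q ps ih => intro row; simp only [List.foldl_cons]; rw [ih]; exact List.length_set ..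

theorem pvScatter_get (cols : List String) (hc : cols.Nodup) :
    ∀ (ps : List (String × Int)) (row : List (Option Int)),
    row.length = cols.length →
    (ps.map Prod.fst).Nodup →
    (∀ q ∈ ps, q.1 ∈ cols) →
    ∀ (j : Nat) (hj : j < cols.length),
    (ps.foldl (fun row q => row.set (cols.idxOf q.1) (some q.2)) row)[j]? =
      (match ps.find? (fun q => q.1 == cols[j]) with
        | some q => some (some q.2)
        | none => row[j]?) := by
  intro ps
  induction ps with
  | nil => intro row _ _ _ j hj; simp
  | cons q ps ih =>
      intro row hrow hnd hsub j hj
      have hnd' : (ps.map Prod.fst).Nodup := (List.nodup_cons.mp (by simpa using hnd)).2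
      have hqnotin : q.1 ∉ ps.map Prod.fst := (List.nodup_cons.mp (by simpa using hnd)).1
      have hsub' : ∀ p ∈ ps, p.1 ∈ cols := fun p hp => hsub p (List.mem_cons_of_mem _ hp)
      have hrow' : (row.set (cols.idxOf q.1) (some q.2)).length = cols.length := by
        rw [List.length_set]; exact hrow
      simp only [List.foldl_cons]
      rw [ih _ hrow' hnd' hsub' j hj]
      by_cases hq : q.1 = cols[j]
      · -- head pair hits column j
        have hfind : ps.find? (fun p => p.1 == cols[j]) = none := by
          rw [List.find?_eq_none]
          intro p hp
          simp only [beq_iff_eq]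
          intro hpe
          have hpq : p.1 = q.1 := by rw [hpe, ← hq]
          exact hqnotin (hpq ▸ List.mem_map_of_mem hp)
        rw [hfind, List.find?_cons_of_pos (by simp [hq])]
        have hidx : cols.idxOf q.1 = j := by rw [hq]; exact hc.idxOf_getElem j hj
        rw [hidx, List.getElem?_set_self (by omega)]
      · rw [List.find?_cons_of_neg (by simp [hq])]
        cases hfind : ps.find? (fun p => p.1 == cols[j]) with
        | some p => rfl
        | none =>
            have hqmem : q.1 ∈ cols := hsub q (List.mem_cons_self)
            have hne : cols.idxOf q.1 ≠ j := by
              intro he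
              apply hq
              subst he
              exact (List.getElem_idxOf (List.idxOf_lt_length_of_mem hqmem)).symm
            rw [List.getElem?_set_ne hne]

-- get? of a dict is the first matching item (definitional).
theorem pvDict_get?_eq_find? (l : List (String × Int)) (k : String) :
    (PySem.Dict.mk l).get? k = (l.find? (fun q => q.1 == k)).map Prod.snd := rfl

-- B's fill of one row equals A's gather over cols, for any doc of t.
theorem pvFillRow_eq (t : List (List (String × Int))) (d : List (String × Int)) (hd : d ∈ t) :
    pvFillRow (t.foldl pvIdxAdd PySem.Dict.empty) (t.foldl pvIdxAdd PySem.Dict.empty).size d =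
      (t.foldl pvColsAdd []).map (fun k => (PySem.Dict.ofList d).get? k) := by
  have hinv := pvInv_fold t PySem.Dict.empty [] pvInv_empty
  obtain ⟨hkeys, hget⟩ := hinv
  set cols := t.foldl pvColsAdd [] with hcols
  set idx := t.foldl pvIdxAdd PySem.Dict.empty with hidx
  have hsize : idx.size = cols.length := by rw [pvDict_size_eq_keys_length, hkeys]
  have hcnd : cols.Nodup := pvCols_nodup t [] List.nodup_nil
  have hsub : ∀ q ∈ (PySem.Dict.ofList d).items, q.1 ∈ cols := by
    intro q hq
    exact pvCols_mem_of_key t [] d hd q.1 (PySem.Dict.mem_keys_of_mem_items _ hq)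
  have hnd : ((PySem.Dict.ofList d).items.map Prod.fst).Nodup := by
    have := PySem.Dict.nodup_keys_ofList (ps := d)
    simpa [PySem.Dict.keys] using this
  -- replace the dict lookup in B's loop by the column position
  have hstep : pvFillRow idx idx.size d =
      (PySem.Dict.ofList d).items.foldl
        (fun row q => row.set (cols.idxOf q.1) (some q.2)) (List.replicate idx.size none) := by
    unfold pvFillRow
    apply PySem.List.foldl_congr_mem
    intro row q hq
    rw [hget q.1, if_pos (hsub q hq)]
  rw [hstep, hsize]
  -- now compare elementwise
  apply List.ext_getElem?
  intro j
  by_cases hj : j < cols.length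
  · rw [pvScatter_get cols hcnd _ _ (by simp) hnd hsub j hj]
    rw [List.getElem?_map, List.getElem?_eq_getElem hj]
    simp only [Option.map_some]
    have hbridge : (PySem.Dict.ofList d).get? cols[j] =
        ((PySem.Dict.ofList d).items.find? (fun q => q.1 == cols[j])).map Prod.snd := by
      cases hdd : PySem.Dict.ofList d with
      | mk l => rw [← hdd]; rw [show (PySem.Dict.ofList d).items = l from by rw [hdd]]
                exact hdd ▸ pvDict_get?_eq_find? l cols[j]
    rw [hbridge]
    cases hfind : (PySem.Dict.ofList d).items.find? (fun q => q.1 == cols[j]) with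
    | some p => simp
    | none => simp [hj]
  · have h1 : ((PySem.Dict.ofList d).items.foldl
        (fun row q => row.set (cols.idxOf q.1) (some q.2)) (List.replicate cols.length none)).length = cols.length := by
      rw [pvScatter_length]; simp
    rw [List.getElem?_eq_none (by rw [h1]; omega), List.getElem?_eq_none (by rw [List.length_map]; omega)]

-- ===== VERDICT (by name: the statement is the Claim_ definition above) =====
theorem docs_to_rows_spec : Claim_equal_docs_to_rows := by
  intro docs cap _
  unfold Spec_docs_to_rows docs_to_rows docs_to_rows_alt
  simp only []
  have hinv := pvInv_fold (PySem.List.slice docs none (some cap)) PySem.Dict.empty [] pvInv_empty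
  refine Prod.ext ?_ hinv.1.symm
  apply List.map_congr_left
  intro d hd
  exact (pvFillRow_eq _ d hd).symm
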